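-- pv_equiv track=rewrite | github.com/domsson/sanename | sanename.py | make_sane_token
-- ===== SOURCE A (Python) =====
-- OPT_KEEP_WHEN_HEAD = 1
--
-- OPT_KEEP_WHEN_BODY = 2
--
-- OPT_KEEP_WHEN_TAIL = 4
--
-- def make_sane_token(string, charmap={}, keep=[], opts=0):
--     # Turn to lower case and remove leading/trailing whitespace
--     string = string.lower().strip()
--
--     # Now we swap some characters as specified in charmap
--     for search, replace in charmap.items():
--         string = string.replace(search, replace)
--
--     # Now we remove everything not alpha-numeric and not in keep
--     result = ""
--     for i, c in enumerate(string):
--         # keep chars from 'keep', if options allow it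
--         if c in keep:
--             if i == 0:
--                 if opts & OPT_KEEP_WHEN_HEAD:
--                     result += c
--                 continue
--             if i == (len(string)-1):
--                 if opts & OPT_KEEP_WHEN_TAIL:
--                     result += c
--                 continue
--             if (opts & OPT_KEEP_WHEN_BODY):
--                 result += c
--             continue
--         # keep 0-9
--         if ord(c) >= 48 and ord(c) <= 57:
--             result += c
--             continue
--         # keep a-z
--         if ord(c) >= 97 and ord(c) <= 122:
--             result += c
--             continue
--
--     # Done, return it!
--     return result
-- ===== SOURCE B (Python) =====
-- OPT_KEEP_WHEN_HEAD = 1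
--
-- OPT_KEEP_WHEN_BODY = 2
--
-- OPT_KEEP_WHEN_TAIL = 4
--
-- def make_sane_token(string, charmap={}, keep=[], opts=0):
--     s = string.lower().strip()
--     for search, replace in charmap.items():
--         s = s.replace(search, replace)
--
--     def decide(c, keep_here):
--         if c in keep:
--             return c if keep_here else ''
--         if '0' <= c <= '9' or 'a' <= c <= 'z':
--             return c
--         return ''
--
--     if s == '':
--         return ''
--     if len(s) == 1:
--         return decide(s[0], opts & OPT_KEEP_WHEN_HEAD)
--     return (decide(s[0], opts & OPT_KEEP_WHEN_HEAD)
--             + ''.join(decide(c, opts & OPT_KEEP_WHEN_BODY) for c in s[1:-1])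
--             + decide(s[-1], opts & OPT_KEEP_WHEN_TAIL))
-- ===== Notes on version B (the rewrite author's own statement) =====
-- stated objective: simpler
-- what changed: Replaces the single indexed loop with per-index position tests by a three-zone decomposition (head char, body slice, tail char), each filtered by one shared decide helper, so no index bookkeeping remains.
import Mathlib
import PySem

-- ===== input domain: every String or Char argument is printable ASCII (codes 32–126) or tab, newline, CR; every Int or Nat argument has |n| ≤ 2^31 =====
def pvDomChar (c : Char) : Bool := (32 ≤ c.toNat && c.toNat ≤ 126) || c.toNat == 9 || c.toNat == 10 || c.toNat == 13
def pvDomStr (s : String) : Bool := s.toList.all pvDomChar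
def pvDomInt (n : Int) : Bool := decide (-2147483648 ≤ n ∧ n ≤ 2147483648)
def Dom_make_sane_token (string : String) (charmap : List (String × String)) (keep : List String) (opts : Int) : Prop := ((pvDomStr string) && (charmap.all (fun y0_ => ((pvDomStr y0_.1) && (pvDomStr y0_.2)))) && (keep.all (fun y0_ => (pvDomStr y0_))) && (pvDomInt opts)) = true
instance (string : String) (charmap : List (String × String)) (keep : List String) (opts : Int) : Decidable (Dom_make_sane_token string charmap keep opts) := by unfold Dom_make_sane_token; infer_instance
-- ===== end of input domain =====

-- B replaces A's single indexed loop (per-character position tests) by a head/body/tail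
-- zone decomposition with one shared `decide` helper; objective: simpler, not faster.

-- ===== PORT A =====
-- shared prefix of both Pythons: lower, strip, then the charmap-items replacement loop
def pvPrep (string : String) (charmap : List (String × String)) : List Char :=
  (((PySem.Dict.ofList charmap).items).foldl
    (fun s p => PySem.Str.replace s p.1 p.2)
    (PySem.Str.strip (PySem.Str.lower string))).toList

-- A's loop body (n = len(string) after the replacements)
def pvStepA (keep : List String) (opts : Int) (n : Int) (result : List Char) (ic : Int × Char) : List Char :=
  let i := ic.1
  let c := ic.2
  if String.ofList [c] ∈ keep then
    if i = 0 then (if PySem.Int.band opts 1 ≠ 0 then result ++ [c] else result)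
    else if i = n - 1 then (if PySem.Int.band opts 4 ≠ 0 then result ++ [c] else result)
    else if PySem.Int.band opts 2 ≠ 0 then result ++ [c] else result
  else if 48 ≤ c.toNat ∧ c.toNat ≤ 57 then result ++ [c]
  else if 97 ≤ c.toNat ∧ c.toNat ≤ 122 then result ++ [c]
  else result

def make_sane_token (string : String) (charmap : List (String × String)) (keep : List String) (opts : Int) : String :=
  String.ofList
    ((PySem.List.enumerate (pvPrep string charmap) 0).foldl
      (pvStepA keep opts ((pvPrep string charmap).length : Int)) [])

-- ===== PORT B =====
-- Source B's decide(c, keep_here): the chars contributed by c in a zone with keep-flag keep_here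
def pvDecide (keep : List String) (c : Char) (keepHere : Bool) : List Char :=
  if String.ofList [c] ∈ keep then (if keepHere then [c] else [])
  else if ('0' ≤ c ∧ c ≤ '9') ∨ ('a' ≤ c ∧ c ≤ 'z') then [c]
  else []

def make_sane_token_alt (string : String) (charmap : List (String × String)) (keep : List String) (opts : Int) : String :=
  match pvPrep string charmap with
  | [] => ""
  | [c] => String.ofList (pvDecide keep c (PySem.Int.band opts 1 ≠ 0))
  | c :: d :: t =>
      String.ofList
        (pvDecide keep c (PySem.Int.band opts 1 ≠ 0)
          ++ ((d :: t).dropLast).flatMap (fun b => pvDecide keep b (PySem.Int.band opts 2 ≠ 0))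
          ++ pvDecide keep ((d :: t).getLast (by simp)) (PySem.Int.band opts 4 ≠ 0))

-- ===== PRECONDITION & SPEC =====
def Spec_make_sane_token (string : String) (charmap : List (String × String)) (keep : List String) (opts : Int) (out : String) : Prop := out = make_sane_token_alt string charmap keep opts
instance (string : String) (charmap : List (String × String)) (keep : List String) (opts : Int) (out : String) : Decidable (Spec_make_sane_token string charmap keep opts out) := by unfold Spec_make_sane_token; infer_instance

-- ===== CLAIM (what is proved, stated in full; the proofs are below) =====
def Claim_equal_make_sane_token : Prop := ∀ (string : String) (charmap : List (String × String)) (keep : List String) (opts : Int), Dom_make_sane_token string charmap keep opts → Spec_make_sane_token string charmap keep opts (make_sane_token string charmap keep opts)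

-- ===== LEMMAS AND PROOFS =====

-- the per-character contribution of A's loop body
def pvG (keep : List String) (opts : Int) (n : Int) (ic : Int × Char) : List Char :=
  if String.ofList [ic.2] ∈ keep then
    if ic.1 = 0 then (if PySem.Int.band opts 1 ≠ 0 then [ic.2] else [])
    else if ic.1 = n - 1 then (if PySem.Int.band opts 4 ≠ 0 then [ic.2] else [])
    else if PySem.Int.band opts 2 ≠ 0 then [ic.2] else []
  else if 48 ≤ ic.2.toNat ∧ ic.2.toNat ≤ 57 then [ic.2]
  else if 97 ≤ ic.2.toNat ∧ ic.2.toNat ≤ 122 then [ic.2]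
  else []

lemma pvStepA_eq (keep : List String) (opts : Int) (n : Int) (acc : List Char) (ic : Int × Char) :
    pvStepA keep opts n acc ic = acc ++ pvG keep opts n ic := by
  unfold pvStepA pvG
  by_cases hk : String.ofList [ic.2] ∈ keep <;>
    by_cases h0 : ic.1 = 0 <;>
      by_cases h1 : ic.1 = n - 1 <;>
        by_cases hd : 48 ≤ ic.2.toNat ∧ ic.2.toNat ≤ 57 <;>
          by_cases ha : 97 ≤ ic.2.toNat ∧ ic.2.toNat ≤ 122 <;>
            simp [hk, h0, h1, hd, ha] <;> split_ifs <;> simp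

lemma foldlA_eq_flatMap (keep : List String) (opts : Int) (n : Int)
    (l : List (Int × Char)) (acc : List Char) :
    l.foldl (pvStepA keep opts n) acc = acc ++ l.flatMap (pvG keep opts n) := by
  induction l generalizing acc with
  | nil => simp
  | cons hd tl ih =>
      rw [List.foldl_cons, pvStepA_eq, ih, List.flatMap_cons, List.append_assoc]

-- the two programs' alphanumeric range tests coincide
lemma pvDecide_eq_alnum (keep : List String) (c : Char) (b : Bool)
    (h : ¬ String.ofList [c] ∈ keep) :
    pvDecide keep c b =
      (if 48 ≤ c.toNat ∧ c.toNat ≤ 57 then [c]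
       else if 97 ≤ c.toNat ∧ c.toNat ≤ 122 then [c] else []) := by
  unfold pvDecide
  rw [if_neg h]
  have h0 : ('0' ≤ c ∧ c ≤ '9') ↔ (48 ≤ c.toNat ∧ c.toNat ≤ 57) := by
    constructor <;> intro ⟨a1, a2⟩ <;>
      exact ⟨by simpa [Char.le_def] using a1, by simpa [Char.le_def] using a2⟩
  have h1 : ('a' ≤ c ∧ c ≤ 'z') ↔ (97 ≤ c.toNat ∧ c.toNat ≤ 122) := by
    constructor <;> intro ⟨a1, a2⟩ <;>
      exact ⟨by simpa [Char.le_def] using a1, by simpa [Char.le_def] using a2⟩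
  by_cases p : 48 ≤ c.toNat ∧ c.toNat ≤ 57
  · rw [if_pos p, if_pos (Or.inl (h0.mpr p))]
  · by_cases q : 97 ≤ c.toNat ∧ c.toNat ≤ 122
    · rw [if_neg p, if_pos q, if_pos (Or.inr (h1.mpr q))]
    · rw [if_neg p, if_neg q, if_neg (by rw [h0, h1] at *; tauto)]

-- pvG at the head index (i = 0) is B's head decide
lemma pvG_head (keep : List String) (opts : Int) (n : Int) (c : Char) :
    pvG keep opts n (0, c) = pvDecide keep c (PySem.Int.band opts 1 ≠ 0) := by
  by_cases hk : String.ofList [c] ∈ keep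
  · simp [pvG, pvDecide, hk]
  · rw [pvDecide_eq_alnum keep c _ hk]; simp [pvG, hk]

-- pvG at the last index (i = n-1 ≠ 0) is B's tail decide
lemma pvG_last (keep : List String) (opts : Int) (n i : Int) (c : Char)
    (h0 : i ≠ 0) (h1 : i = n - 1) :
    pvG keep opts n (i, c) = pvDecide keep c (PySem.Int.band opts 4 ≠ 0) := by
  have h2 : ¬ (n - 1 = 0) := by omega
  by_cases hk : String.ofList [c] ∈ keep
  · simp [pvG, pvDecide, hk, h1, h2]
  · rw [pvDecide_eq_alnum keep c _ hk]; simp [pvG, hk]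

-- pvG at a body index is B's body decide
lemma pvG_body (keep : List String) (opts : Int) (n i : Int) (c : Char)
    (h0 : i ≠ 0) (h1 : i ≠ n - 1) :
    pvG keep opts n (i, c) = pvDecide keep c (PySem.Int.band opts 2 ≠ 0) := by
  by_cases hk : String.ofList [c] ∈ keep
  · simp [pvG, pvDecide, hk, h0, h1]
  · rw [pvDecide_eq_alnum keep c _ hk]; simp [pvG, hk]

-- zone lemma (last element split off): indices start at i ≥ 1 and end at n-1
lemma flatMap_enumerate_concat (keep : List String) (opts : Int)
    (l : List Char) (z : Char) (i n : Int) (hi : 1 ≤ i)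
    (hn : n = i + l.length + 1) :
    (PySem.List.enumerate (l ++ [z]) i).flatMap (pvG keep opts n)
      = l.flatMap (fun b => pvDecide keep b (PySem.Int.band opts 2 ≠ 0))
        ++ pvDecide keep z (PySem.Int.band opts 4 ≠ 0) := by
  induction l generalizing i with
  | nil =>
      simp only [List.nil_append, PySem.List.enumerate_cons, PySem.List.enumerate_nil,
        List.flatMap_cons, List.flatMap_nil, List.append_nil]
      rw [pvG_last keep opts n i z (by omega) (by simp at hn; omega)]
  | cons x l' ih =>
      rw [List.cons_append, PySem.List.enumerate_cons, List.flatMap_cons, List.flatMap_cons]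
      have hlen : n = (i + 1) + l'.length + 1 := by
        simp only [List.length_cons] at hn; push_cast at hn ⊢; omega
      rw [pvG_body keep opts n i x (by omega)
            (by simp only [List.length_cons] at hn; push_cast at hn; omega),
          ih (i + 1) (by omega) hlen, List.append_assoc]

-- middle+last zone, stated with dropLast/getLast as in B
lemma flatMap_enumerate_tail (keep : List String) (opts : Int)
    (l : List Char) (hl : l ≠ []) (i n : Int) (hi : 1 ≤ i) (hn : n = i + l.length) :
    (PySem.List.enumerate l i).flatMap (pvG keep opts n)
      = l.dropLast.flatMap (fun b => pvDecide keep b (PySem.Int.band opts 2 ≠ 0))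
        ++ pvDecide keep (l.getLast hl) (PySem.Int.band opts 4 ≠ 0) := by
  conv_lhs => rw [← List.dropLast_append_getLast hl]
  rw [flatMap_enumerate_concat keep opts l.dropLast (l.getLast hl) i n hi]
  have hpos : 0 < l.length := List.length_pos_iff.mpr hl
  rw [hn, List.length_dropLast]
  push_cast [Nat.cast_sub hpos]
  ring

-- ===== VERDICT (by name: the statement is the Claim_ definition above) =====
theorem make_sane_token_spec : Claim_equal_make_sane_token := by
  intro string charmap keep opts _
  show make_sane_token string charmap keep opts = make_sane_token_alt string charmap keep opts
  unfold make_sane_token make_sane_token_alt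
  rw [foldlA_eq_flatMap]
  cases hcs : pvPrep string charmap with
  | nil => simp
  | cons c tl =>
      cases tl with
      | nil =>
          simp only [PySem.List.enumerate_cons, PySem.List.enumerate_nil,
            List.flatMap_cons, List.flatMap_nil, List.append_nil, List.nil_append]
          exact congrArg String.ofList (pvG_head keep opts _ c)
      | cons d t =>
          rw [PySem.List.enumerate_cons, List.flatMap_cons, List.nil_append]
          rw [show (0 : Int) + 1 = 1 from rfl]
          rw [flatMap_enumerate_tail keep opts (d :: t) (by simp) 1
                ((c :: d :: t).length : Int) le_rfl
                (by simp only [List.length_cons]; push_cast; omega)]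
          rw [pvG_head keep opts _ c]
          exact congrArg String.ofList (List.append_assoc _ _ _).symm
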